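-- pv_equiv track=rewrite | github.com/mgonc/format-currency | src/format_currency/format.py | format_china_numbering_system
-- ===== SOURCE A (Python) =====
-- def format_china_numbering_system(number_str):
--     is_negative = number_str.startswith('-')
--
--     if is_negative:
--         number_str = number_str[1:]
--
--     number_str = number_str.replace(',', '')
--     s, *d = number_str.partition(".")
--     r = ",".join([s[x-4:x] for x in range(-4, -len(s), -4)][::-1] + [s[-4:]])
--     result = "".join([r] + d)
--
--     if is_negative:
--         return '-' + result
--
--     return result
-- ===== SOURCE B (Python) =====
-- def format_china_numbering_system(number_str):
--     is_negative = number_str.startswith('-')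
--
--     if is_negative:
--         number_str = number_str[1:]
--
--     number_str = number_str.replace(',', '')
--     s, sep, frac = number_str.partition(".")
--     n = len(s)
--     out = []
--     for i, ch in enumerate(s):
--         if i > 0 and (n - i) % 4 == 0:
--             out.append(',')
--         out.append(ch)
--     result = ''.join(out) + sep + frac
--
--     if is_negative:
--         return '-' + result
--
--     return result
-- ===== Notes on version B (the rewrite author's own statement) =====
-- stated objective: simpler
-- what changed: A builds the 4-digit groups with a negative-index slicing comprehension over a descending range, reverses the chunk list and joins it with comma separators; B makes a single left-to-right pass over the integer part, inserting a comma exactly where the number of remaining characters is a positive multiple of four.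
import Mathlib
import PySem

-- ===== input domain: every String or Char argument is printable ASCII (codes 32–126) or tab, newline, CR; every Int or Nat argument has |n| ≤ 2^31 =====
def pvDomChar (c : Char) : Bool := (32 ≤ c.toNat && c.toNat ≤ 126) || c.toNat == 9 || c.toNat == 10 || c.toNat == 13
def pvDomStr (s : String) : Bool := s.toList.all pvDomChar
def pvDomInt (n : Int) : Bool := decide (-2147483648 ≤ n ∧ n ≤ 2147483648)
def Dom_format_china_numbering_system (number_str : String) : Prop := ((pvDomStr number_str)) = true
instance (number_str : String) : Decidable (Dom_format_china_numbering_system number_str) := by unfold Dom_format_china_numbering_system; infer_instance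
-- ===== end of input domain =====

-- B replaces A's negative-index slicing comprehension (+ reverse + join) for the 4-digit
-- grouping by a single left-to-right pass that inserts a comma whenever the number of
-- characters remaining is a positive multiple of four (objective: simpler one-pass loop).

-- ===== PORT A =====
-- shared scaffolding helper: str.partition(".") (PySem has no partition primitive);
-- exact: (text before the first '.', the '.' if present else '', text after it)
def pyPartitionDot (cs : List Char) : List Char × List Char × List Char :=
  match cs.dropWhile (· ≠ '.') with
  | [] => (cs, [], [])
  | c :: t => (cs.takeWhile (· ≠ '.'), [c], t)

def format_china_numbering_system (number_str : String) : String :=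
  let cs0 := number_str.toList
  let isNeg := PySem.Chars.startswith cs0 ['-']
  let cs1 := if isNeg then PySem.List.slice cs0 (some 1) none else cs0
  let cs2 := PySem.Chars.replace cs1 [','] []
  let p := pyPartitionDot cs2
  let s := p.1
  let r := PySem.Chars.join [',']
      (((PySem.List.slice? ((PySem.List.pyRange (-4) (-(s.length : Int)) (-4)).map
            (fun x => PySem.List.slice s (some (x - 4)) (some x))) none none (-1)).getD [])
        ++ [PySem.List.slice s (some (-4)) none])
  let result := PySem.Chars.join [] ([r] ++ [p.2.1, p.2.2])
  if isNeg then String.ofList ('-' :: result) else String.ofList result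

-- ===== PORT B =====
def format_china_numbering_system_alt (number_str : String) : String :=
  let cs0 := number_str.toList
  let isNeg := PySem.Chars.startswith cs0 ['-']
  let cs1 := if isNeg then PySem.List.slice cs0 (some 1) none else cs0
  let cs2 := PySem.Chars.replace cs1 [','] []
  let p := pyPartitionDot cs2
  let s := p.1
  let n := s.length
  let out := (PySem.List.enumerate s 0).foldl
      (fun acc q => if q.1 > 0 ∧ PySem.Int.mod ((n : Int) - q.1) 4 = 0
                    then acc ++ [','] ++ [q.2] else acc ++ [q.2]) []
  let result := out ++ p.2.1 ++ p.2.2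
  if isNeg then String.ofList ('-' :: result) else String.ofList result

-- ===== PRECONDITION & SPEC =====
def Spec_format_china_numbering_system (number_str : String) (out : String) : Prop := out = format_china_numbering_system_alt number_str
instance (number_str : String) (out : String) : Decidable (Spec_format_china_numbering_system number_str out) := by unfold Spec_format_china_numbering_system; infer_instance

-- ===== CLAIM (what is proved, stated in full; the proofs are below) =====
def Claim_equal_format_china_numbering_system : Prop := ∀ (number_str : String), Dom_format_china_numbering_system number_str → Spec_format_china_numbering_system number_str (format_china_numbering_system number_str)

-- ===== LEMMAS AND PROOFS =====

lemma pvRange4 (n : Nat) : PySem.List.pyRange (-4) (-(n:Int)) (-4)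
    = (List.range ((n-1)/4)).map (fun (k : Nat) => ((-4 + (-4) * k : Int))) := by
  unfold PySem.List.pyRange
  rw [if_neg (by norm_num), if_neg (by norm_num)]
  rw [show (-4 - -(n:Int) + - -4 - 1) = (n:Int) - 1 by ring, show (- -(4:Int)) = 4 by norm_num]
  split_ifs with h
  · rw [show (((n:Int) - 1) / 4).toNat = (n-1)/4 by omega]
  · rw [show (n-1)/4 = 0 by omega]

lemma pvTakeDropAppend (t u : List Char) (d c : Nat) (h : d + c ≤ t.length) :
    List.take c (List.drop d (t ++ u)) = List.take c (List.drop d t) := by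
  rw [List.take_drop, List.take_drop, List.take_append_of_le_length (by omega)]

lemma pvClampNeg (n : Nat) (i : Int) (h : i < 0) :
    PySem.List.clampIdx n i = ((n:Int) + i).toNat := by
  unfold PySem.List.clampIdx
  rw [if_pos h]
  split_ifs with h2
  · omega
  · rfl

lemma pvSliceShift (t u : List Char) (hu : u.length = 4) (a b : Int) (hb : b ≤ -4) (hab : a ≤ b) :
    PySem.List.slice (t ++ u) (some (a - 4)) (some (b - 4)) = PySem.List.slice t (some a) (some b) := by
  simp only [PySem.List.slice, List.length_append, hu,
    pvClampNeg _ (a - 4) (by omega), pvClampNeg _ (b - 4) (by omega),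
    pvClampNeg _ a (by omega), pvClampNeg _ b (by omega)]
  rw [show ((t.length + 4 : Nat) : Int) + (a - 4) = (t.length:Int) + a by push_cast; ring,
      show ((t.length + 4 : Nat) : Int) + (b - 4) = (t.length:Int) + b by push_cast; ring]
  exact pvTakeDropAppend t u _ _ (by omega)

lemma pvLastChunk (t u : List Char) (hu : u.length = 4) :
    PySem.List.slice (t ++ u) (some (-8)) (some (-4)) = PySem.List.slice t (some (-4)) none := by
  simp only [PySem.List.slice, List.length_append, hu,
    pvClampNeg _ (-8) (by norm_num), pvClampNeg _ (-4) (by norm_num)]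
  rw [show ((t.length + 4 : Nat) : Int) + (-8) = (t.length:Int) + (-4) by push_cast; ring]
  rw [show (((t.length + 4 : Nat) : Int) + (-4)).toNat = t.length by omega]
  exact pvTakeDropAppend t u _ _ (by omega)

lemma pvLast4 (t u : List Char) (hu : u.length = 4) :
    PySem.List.slice (t ++ u) (some (-4)) none = u := by
  simp only [PySem.List.slice, List.length_append, hu, pvClampNeg _ (-4) (by norm_num)]
  rw [show (((t.length + 4 : Nat) : Int) + (-4)).toNat = t.length by omega]
  rw [List.drop_append_of_le_length (by omega), List.drop_length, List.nil_append,
      show t.length + 4 - t.length = 4 by omega, ← hu, List.take_length]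

lemma pvJoinApp (sep c : List Char) (l : List (List Char)) (h : l ≠ []) :
    PySem.Chars.join sep (l ++ [c]) = PySem.Chars.join sep l ++ sep ++ c := by
  induction l with
  | nil => exact absurd rfl h
  | cons a l ih =>
      cases l with
      | nil => simp [PySem.Chars.join_cons_cons, PySem.Chars.join_singleton]
      | cons b l =>
          rw [List.cons_append, List.cons_append, PySem.Chars.join_cons_cons,
              PySem.Chars.join_cons_cons, ← List.cons_append, ih (by simp)]
          simp [List.append_assoc]

def pvBStep (n : Nat) : List Char → Int × Char → List Char :=
  fun acc q => if q.1 > 0 ∧ PySem.Int.mod ((n : Int) - q.1) 4 = 0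
               then acc ++ [','] ++ [q.2] else acc ++ [q.2]

lemma pvBStep_congr (n m : Nat) (h : (4:Int) ∣ ((n:Int) - (m:Int))) : pvBStep n = pvBStep m := by
  funext acc q
  unfold pvBStep
  have hiff : (q.1 > 0 ∧ PySem.Int.mod ((n:Int) - q.1) 4 = 0) ↔
      (q.1 > 0 ∧ PySem.Int.mod ((m:Int) - q.1) 4 = 0) := by
    rw [PySem.Int.mod_eq_zero_iff_dvd, PySem.Int.mod_eq_zero_iff_dvd]
    constructor <;> rintro ⟨h1, h2⟩ <;> exact ⟨h1, by omega⟩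
  rw [if_congr hiff rfl rfl]

lemma pvEnumerate_append {α : Type} (t u : List α) (k : Int) :
    PySem.List.enumerate (t ++ u) k
      = PySem.List.enumerate t k ++ PySem.List.enumerate u (k + t.length) := by
  induction t generalizing k with
  | nil => simp [PySem.List.enumerate]
  | cons a t ih =>
      simp [PySem.List.enumerate, ih (k + 1)]
      ring_nf

lemma pvNoComma (n : Nat) (s : List Char) (k : Int) (acc : List Char)
    (h : ∀ i : Int, k ≤ i → i < k + s.length → ¬(i > 0 ∧ PySem.Int.mod ((n : Int) - i) 4 = 0)) :
    (PySem.List.enumerate s k).foldl (pvBStep n) acc = acc ++ s := by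
  induction s generalizing k acc with
  | nil => simp [PySem.List.enumerate]
  | cons a t ih =>
      simp only [PySem.List.enumerate, List.foldl_cons]
      rw [show pvBStep n acc (k, a) = acc ++ [a] from
        if_neg (h k le_rfl (by simp only [List.length_cons]; push_cast; omega))]
      rw [ih (k + 1) (acc ++ [a]) (fun i h1 h2 => h i (by omega)
        (by simp only [List.length_cons] at *; push_cast at *; omega))]
      simp

lemma pvGroup_eq (s : List Char) :
    PySem.Chars.join [',']
      (((PySem.List.pyRange (-4) (-(s.length : Int)) (-4)).map
          (fun x => PySem.List.slice s (some (x - 4)) (some x))).reverse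
        ++ [PySem.List.slice s (some (-4)) none])
      = (PySem.List.enumerate s 0).foldl (pvBStep s.length) [] := by
  generalize hn : s.length = n
  induction n using Nat.strong_induction_on generalizing s with
  | _ n ih =>
  by_cases h4 : n ≤ 4
  · -- integer part of at most 4 digits: no separator on either side
    rw [pvRange4, show (n-1)/4 = 0 by omega]
    simp only [List.range_zero, List.map_nil, List.reverse_nil, List.nil_append,
      PySem.Chars.join_singleton]
    rw [PySem.List.slice_some_none, pvClampNeg _ _ (by norm_num), hn,
        show (((n:Int)) + (-4)).toNat = 0 by omega, List.drop_zero]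
    rw [pvNoComma n s 0 [] (fun i h1 h2 hc => by
      rw [PySem.Int.mod_eq_zero_iff_dvd] at hc
      rw [hn] at h2
      omega)]
    simp
  · -- peel the last 4 characters: s = t ++ u, |u| = 4
    obtain ⟨t, u, hs, ht, hu⟩ : ∃ t u, s = t ++ u ∧ t.length = n - 4 ∧ u.length = 4 :=
      ⟨s.take (n-4), s.drop (n-4), (List.take_append_drop _ s).symm,
        by simp [hn], by simp [hn]; omega⟩
    subst hs
    rw [pvRange4, show (n-1)/4 = (n-4-1)/4 + 1 by omega, List.range_succ_eq_map]
    simp only [List.map_cons, List.map_map, List.reverse_cons]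
    rw [pvLast4 t u hu]
    rw [show PySem.List.slice (t ++ u) (some (-4 + -4 * ((0:Nat):Int) - 4)) (some (-4 + -4 * ((0:Nat):Int))) =
        PySem.List.slice (t ++ u) (some (-8)) (some (-4)) by norm_num]
    rw [pvLastChunk t u hu]
    have hmap : List.map ((fun x => PySem.List.slice (t ++ u) (some (x - 4)) (some x)) ∘
          (fun (k : Nat) => ((-4 + (-4) * k : Int))) ∘ Nat.succ) (List.range ((n - 4 - 1) / 4))
        = List.map ((fun x => PySem.List.slice t (some (x - 4)) (some x)) ∘
          (fun (k : Nat) => ((-4 + (-4) * k : Int)))) (List.range ((n - 4 - 1) / 4)) := by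
      apply List.map_congr_left
      intro k _
      show PySem.List.slice (t ++ u) (some (-4 + -4 * ((k+1 : Nat):Int) - 4)) (some (-4 + -4 * ((k+1 : Nat):Int)))
          = PySem.List.slice t (some (-4 + -4 * (k:Int) - 4)) (some (-4 + -4 * (k:Int)))
      have := pvSliceShift t u hu (-4 + -4 * (k:Int) - 4) (-4 + -4 * (k:Int)) (by omega) (by omega)
      convert this using 3 <;> push_cast <;> ring
    rw [hmap]
    have hA := ih (n-4) (by omega) t ht
    rw [pvRange4, List.map_map] at hA
    rw [pvJoinApp _ u _ (by simp), hA]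
    rw [pvEnumerate_append t u 0, List.foldl_append]
    rw [show List.foldl (pvBStep n) [] (PySem.List.enumerate t 0)
        = List.foldl (pvBStep (n-4)) [] (PySem.List.enumerate t 0) from by
      rw [pvBStep_congr n (n-4) (by omega)]]
    rcases u with _|⟨a,_|⟨b,_|⟨c,_|⟨d,rest⟩⟩⟩⟩ <;> simp only [List.length_cons, List.length_nil] at hu <;> try omega
    have hrest : rest = [] := by
      have : rest.length = 0 := by omega
      exact List.eq_nil_of_length_eq_zero this
    subst hrest
    simp only [PySem.List.enumerate, List.foldl_cons, List.foldl_nil, pvBStep]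
    have c1 : (0 + (t.length:Int) > 0 ∧ PySem.Int.mod ((n:Int) - (0 + (t.length:Int))) 4 = 0) :=
      ⟨by omega, by rw [PySem.Int.mod_eq_zero_iff_dvd]; omega⟩
    have c2 : ¬(0 + (t.length:Int) + 1 > 0 ∧ PySem.Int.mod ((n:Int) - (0 + (t.length:Int) + 1)) 4 = 0) := by
      rintro ⟨-, h2⟩; rw [PySem.Int.mod_eq_zero_iff_dvd] at h2; omega
    have c3 : ¬(0 + (t.length:Int) + 1 + 1 > 0 ∧ PySem.Int.mod ((n:Int) - (0 + (t.length:Int) + 1 + 1)) 4 = 0) := by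
      rintro ⟨-, h2⟩; rw [PySem.Int.mod_eq_zero_iff_dvd] at h2; omega
    have c4 : ¬(0 + (t.length:Int) + 1 + 1 + 1 > 0 ∧ PySem.Int.mod ((n:Int) - (0 + (t.length:Int) + 1 + 1 + 1)) 4 = 0) := by
      rintro ⟨-, h2⟩; rw [PySem.Int.mod_eq_zero_iff_dvd] at h2; omega
    simp only [if_pos c1, if_neg c2, if_neg c3, if_neg c4]
    simp

lemma pvMain_eq (number_str : String) :
    format_china_numbering_system number_str = format_china_numbering_system_alt number_str := by
  unfold format_china_numbering_system format_china_numbering_system_alt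
  simp only [PySem.List.slice?_none_none_neg_one, Option.getD_some]
  have key := pvGroup_eq
  unfold pvBStep at key
  rw [key]
  simp only [List.singleton_append]
  rw [PySem.Chars.join_cons_cons, PySem.Chars.join_cons_cons, PySem.Chars.join_singleton]
  simp [List.append_assoc]

-- ===== VERDICT (by name: the statement is the Claim_ definition above) =====
theorem format_china_numbering_system_spec : Claim_equal_format_china_numbering_system := by
  intro number_str _
  unfold Spec_format_china_numbering_system
  exact pvMain_eq number_str
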